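-- pv_equiv track=rewrite | github.com/kazijawad/Viewfinder | src/classes/ImageLoader.py | truncateLabel
-- ===== SOURCE A (Python) =====
-- def truncateLabel(text, maxTextLength):
--     cost = 0
--     for index in range(len(text)):
--         if index != 0 and text[index] == text[index - 1]:
--             cost += 2
--         else:
--             cost += 1
--         if cost > maxTextLength:
--             return text[:index]
--     return text
-- ===== SOURCE B (Python) =====
-- def truncateLabel(text, maxTextLength):
--     # per-position cost table: position 0 costs 1, position i costs 2 iff it repeats its predecessor
--     if text:
--         costs = [1] + [2 if a == b else 1 for a, b in zip(text[1:], text)]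
--     else:
--         costs = []
--     # cumulative-cost prefix sums (strictly increasing since every cost >= 1)
--     prefix = []
--     total = 0
--     for c in costs:
--         total += c
--         prefix.append(total)
--     # binary search for the first index whose cumulative cost exceeds the budget
--     lo, hi = 0, len(prefix)
--     while lo < hi:
--         mid = (lo + hi) // 2
--         if prefix[mid] > maxTextLength:
--             hi = mid
--         else:
--             lo = mid + 1
--     return text[:lo]
-- ===== Notes on version B (the rewrite author's own statement) =====
-- stated objective: alternative
-- what changed: Replaces A's single incremental early-exit scan by building a per-character cost table and its prefix sums once, then binary-searching the strictly increasing prefix sums for the cutoff index.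
import Mathlib
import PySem

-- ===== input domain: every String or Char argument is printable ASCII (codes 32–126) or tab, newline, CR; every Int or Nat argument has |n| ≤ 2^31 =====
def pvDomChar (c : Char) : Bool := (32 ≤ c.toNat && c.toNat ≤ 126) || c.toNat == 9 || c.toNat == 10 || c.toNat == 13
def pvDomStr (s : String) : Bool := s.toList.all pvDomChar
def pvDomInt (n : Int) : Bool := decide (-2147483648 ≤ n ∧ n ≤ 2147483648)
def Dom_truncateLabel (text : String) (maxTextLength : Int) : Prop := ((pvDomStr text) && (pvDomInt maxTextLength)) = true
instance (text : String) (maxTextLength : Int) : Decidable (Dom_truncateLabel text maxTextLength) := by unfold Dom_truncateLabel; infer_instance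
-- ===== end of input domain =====

-- B rebuilds the result from a prefix-sum cost table plus a binary search instead of A's
-- incremental early-exit scan; objective: alternative (same O(n) cost, different shape).

-- ===== PORT A =====
-- the 'for index in range(len(text))' loop with running cost and early return text[:index];
-- indexing text[index] / text[index-1] is in range (0 ≤ index < len, and index-1 only when index ≠ 0),
-- ported as getD; text[:index] is PySem.List.slice with upper bound index.
def truncGoA (cs : List Char) (maxTextLength : Int) (i : Nat) (cost : Int) : String :=
  if h : i < cs.length then
    let cost' := if i ≠ 0 ∧ cs.getD i ' ' = cs.getD (i - 1) ' ' then cost + 2 else cost + 1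
    if cost' > maxTextLength then String.mk (PySem.List.slice cs none (some (i : Int)))
    else truncGoA cs maxTextLength (i + 1) cost'
  else String.mk cs
termination_by cs.length - i

def truncateLabel (text : String) (maxTextLength : Int) : String :=
  truncGoA text.toList maxTextLength 0 0

-- ===== PORT B =====
-- costs = [1] + [2 if a == b else 1 for a, b in zip(text[1:], text)]  (empty text → [])
def costsB (cs : List Char) : List Int :=
  match cs with
  | [] => []
  | _ :: t => 1 :: (t.zip cs).map (fun p => if p.1 = p.2 then 2 else 1)

-- the 'for c in costs: total += c; prefix.append(total)' loop
def prefixB (costs : List Int) : List Int :=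
  (costs.foldl (fun (st : Int × List Int) c => (st.1 + c, st.2 ++ [st.1 + c])) (0, [])).2

-- the 'while lo < hi' binary-search loop; prefix[mid] is in range (lo ≤ mid < hi ≤ len), ported as getD
def bsearchB (pf : List Int) (maxTextLength : Int) (lo hi : Nat) : Nat :=
  if _h : lo < hi then
    let mid := (lo + hi) / 2
    if pf.getD mid 0 > maxTextLength then bsearchB pf maxTextLength lo mid
    else bsearchB pf maxTextLength (mid + 1) hi
  else lo
termination_by hi - lo
decreasing_by all_goals omega

def truncateLabel_alt (text : String) (maxTextLength : Int) : String :=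
  let pf := prefixB (costsB text.toList)
  String.mk (PySem.List.slice text.toList none (some ((bsearchB pf maxTextLength 0 pf.length : Nat) : Int)))

-- ===== PRECONDITION & SPEC =====
def Spec_truncateLabel (text : String) (maxTextLength : Int) (out : String) : Prop := out = truncateLabel_alt text maxTextLength
instance (text : String) (maxTextLength : Int) (out : String) : Decidable (Spec_truncateLabel text maxTextLength out) := by unfold Spec_truncateLabel; infer_instance

-- ===== CLAIM (what is proved, stated in full; the proofs are below) =====
def Claim_equal_truncateLabel : Prop := ∀ (text : String) (maxTextLength : Int), Dom_truncateLabel text maxTextLength → Spec_truncateLabel text maxTextLength (truncateLabel text maxTextLength)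

-- ===== LEMMAS AND PROOFS =====

-- simple recursive running-sum list, used only to reason about prefixB
def pvSums (t : Int) : List Int → List Int
  | [] => []
  | c :: cs => (t + c) :: pvSums (t + c) cs

theorem pvFoldl_prefix (costs : List Int) (t : Int) (acc : List Int) :
    (costs.foldl (fun (st : Int × List Int) c => (st.1 + c, st.2 ++ [st.1 + c])) (t, acc)).2
      = acc ++ pvSums t costs := by
  induction costs generalizing t acc with
  | nil => simp [pvSums]
  | cons c cs ih => simp [List.foldl, pvSums, ih]

theorem prefixB_eq (costs : List Int) : prefixB costs = pvSums 0 costs := by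
  simp [prefixB, pvFoldl_prefix]

theorem pvSums_length (t : Int) (costs : List Int) : (pvSums t costs).length = costs.length := by
  induction costs generalizing t with
  | nil => rfl
  | cons c cs ih => simp [pvSums, ih]

theorem pvSums_getD (costs : List Int) (t : Int) (j : Nat) (hj : j < costs.length) :
    (pvSums t costs).getD j 0 = t + (costs.take (j + 1)).sum := by
  induction costs generalizing t j with
  | nil => simp at hj
  | cons c cs ih =>
    cases j with
    | zero => simp [pvSums]
    | succ j =>
      simp only [pvSums, List.getD_cons_succ, List.take_succ_cons, List.sum_cons]
      rw [ih (t + c) j (by simpa using hj)]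
      ring

theorem costsB_length (cs : List Char) : (costsB cs).length = cs.length := by
  cases cs with
  | nil => rfl
  | cons c t => simp [costsB]

theorem costsB_getD (cs : List Char) (i : Nat) (hi : i < cs.length) :
    (costsB cs).getD i 0 = if i ≠ 0 ∧ cs.getD i ' ' = cs.getD (i - 1) ' ' then 2 else 1 := by
  cases cs with
  | nil => simp at hi
  | cons c t =>
    cases i with
    | zero => simp [costsB]
    | succ j =>
      have hj : j < t.length := by simpa using hi
      have hjz : j < (t.zip (c :: t)).length := by simp; omega
      simp only [costsB, List.getD_cons_succ, ne_eq, Nat.succ_ne_zero, not_false_eq_true,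
        true_and, Nat.add_sub_cancel]
      rw [List.getD_eq_getElem _ _ (show j < (List.map (fun p => if p.1 = p.2 then (2:Int) else 1) (t.zip (c :: t))).length by simpa using hjz), List.getElem_map, List.getElem_zip,
        List.getD_eq_getElem _ _ hj,
        List.getD_eq_getElem _ _ (show j < (c :: t).length by simp; omega)]

-- partial cost sum: S i = sum of the first i per-position costs
def pvS (cs : List Char) (i : Nat) : Int := ((costsB cs).take i).sum

theorem pvS_succ (cs : List Char) (i : Nat) (hi : i < cs.length) :
    pvS cs (i + 1) = pvS cs i + (costsB cs).getD i 0 := by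
  have hi' : i < (costsB cs).length := by rw [costsB_length]; exact hi
  rw [pvS, pvS, List.sum_take_succ _ _ hi', List.getD_eq_getElem _ _ hi']

theorem prefix_getD (cs : List Char) (j : Nat) (hj : j < cs.length) :
    (prefixB (costsB cs)).getD j 0 = pvS cs (j + 1) := by
  rw [prefixB_eq, pvSums_getD _ _ _ (by rw [costsB_length]; exact hj)]
  simp [pvS]

theorem prefix_length (cs : List Char) : (prefixB (costsB cs)).length = cs.length := by
  rw [prefixB_eq, pvSums_length, costsB_length]

theorem pvS_mono (cs : List Char) (j k : Nat) (hjk : j ≤ k) (hk : k ≤ cs.length) :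
    pvS cs j ≤ pvS cs k := by
  induction k with
  | zero =>
    have : j = 0 := by omega
    subst this; exact le_rfl
  | succ k ih =>
    rcases Nat.lt_or_ge j (k + 1) with h | h
    · have hk' : k < cs.length := by omega
      have := ih (by omega) (by omega)
      have hpos : 1 ≤ (costsB cs).getD k 0 := by
        rw [costsB_getD cs k hk']; split <;> omega
      rw [pvS_succ cs k hk']; omega
    · have : j = k + 1 := by omega
      subst this; exact le_rfl

-- the cutoff: number of leading prefix sums that stay within budget
def pvCut (cs : List Char) (m : Int) : Nat :=
  ((prefixB (costsB cs)).takeWhile (fun x => decide (x ≤ m))).length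

theorem takeWhile_spec {α : Type} (p : α → Bool) (l : List α) (d : α) (j : Nat)
    (hj : j < (l.takeWhile p).length) : p (l.getD j d) = true := by
  induction l generalizing j with
  | nil => simp [List.takeWhile] at hj
  | cons a t ih =>
    by_cases hp : p a
    · cases j with
      | zero => simpa
      | succ j =>
        apply ih
        simp only [List.takeWhile, hp] at hj
        simpa using hj
    · simp [List.takeWhile, hp] at hj

theorem takeWhile_stop {α : Type} (p : α → Bool) (l : List α) (d : α)
    (h : (l.takeWhile p).length < l.length) : p (l.getD (l.takeWhile p).length d) = false := by
  induction l with
  | nil => simp at h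
  | cons a t ih =>
    by_cases hp : p a
    · simp only [List.takeWhile, hp] at h ⊢
      simpa using ih (by simpa using h)
    · simpa [List.takeWhile, hp] using hp

theorem takeWhile_len_le {α : Type} (p : α → Bool) (l : List α) :
    (l.takeWhile p).length ≤ l.length := List.Sublist.length_le (List.takeWhile_sublist p)

theorem pvCut_le (cs : List Char) (m : Int) : pvCut cs m ≤ cs.length := by
  have := takeWhile_len_le (fun x => decide (x ≤ m)) (prefixB (costsB cs))
  rw [prefix_length] at this; exact this

theorem pvCut_lt_budget (cs : List Char) (m : Int) (j : Nat) (hj : j < pvCut cs m) :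
    pvS cs (j + 1) ≤ m := by
  have hl : j < cs.length := lt_of_lt_of_le hj (pvCut_le cs m)
  have := takeWhile_spec (fun x => decide (x ≤ m)) (prefixB (costsB cs)) 0 j hj
  rw [prefix_getD cs j hl] at this
  simpa using this

theorem pvCut_over_budget (cs : List Char) (m : Int) (h : pvCut cs m < cs.length) :
    m < pvS cs (pvCut cs m + 1) := by
  unfold pvCut at h ⊢
  have := takeWhile_stop (fun x => decide (x ≤ m)) (prefixB (costsB cs)) 0
    (by rw [prefix_length]; exact h)
  rw [prefix_getD cs _ h] at this
  simpa using this

theorem pvCut_unique (cs : List Char) (m : Int) (n : Nat) (hn : n ≤ cs.length)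
    (h1 : ∀ j < n, pvS cs (j + 1) ≤ m) (h2 : n < cs.length → m < pvS cs (n + 1)) :
    n = pvCut cs m := by
  rcases Nat.lt_trichotomy n (pvCut cs m) with h | h | h
  · exact absurd (pvCut_lt_budget cs m n h) (by have := h2 (lt_of_lt_of_le h (pvCut_le cs m)); omega)
  · exact h
  · exact absurd (h1 (pvCut cs m) h) (by have := pvCut_over_budget cs m (lt_of_lt_of_le h hn); omega)

-- A's loop returns the cut prefix
theorem truncGoA_eq (cs : List Char) (m : Int) (i : Nat) (hi : i ≤ cs.length)
    (hpre : ∀ j < i, pvS cs (j + 1) ≤ m) :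
    truncGoA cs m i (pvS cs i) = String.mk (cs.take (pvCut cs m)) := by
  rw [truncGoA]
  split
  case isTrue h =>
    have hcost : (if i ≠ 0 ∧ cs.getD i ' ' = cs.getD (i - 1) ' ' then pvS cs i + 2 else pvS cs i + 1)
        = pvS cs (i + 1) := by
      rw [pvS_succ cs i h, costsB_getD cs i h]; split <;> ring
    simp only [hcost]
    split
    case isTrue hgt =>
      have : i = pvCut cs m := pvCut_unique cs m i hi hpre (fun _ => hgt)
      rw [PySem.List.slice_to_natCast, this]
    case isFalse hle =>
      have hpre' : ∀ j < i + 1, pvS cs (j + 1) ≤ m := by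
        intro j hj
        rcases Nat.lt_or_ge j i with hj' | hj'
        · exact hpre j hj'
        · have : j = i := by omega
          subst this; omega
      exact truncGoA_eq cs m (i + 1) h hpre'
  case isFalse h =>
    have hi' : i = cs.length := by omega
    have : cs.length = pvCut cs m := by
      apply pvCut_unique cs m cs.length le_rfl
      · intro j hj; exact hpre j (by omega)
      · omega
    rw [← this]
    simp
termination_by cs.length - i

-- B's binary search returns the cut
theorem bsearchB_eq (cs : List Char) (m : Int) (lo hi : Nat) (hlohi : lo ≤ hi)
    (hhi : hi ≤ cs.length)
    (hlo : ∀ j < lo, pvS cs (j + 1) ≤ m)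
    (hhi2 : ∀ j, hi ≤ j → j < cs.length → m < pvS cs (j + 1)) :
    bsearchB (prefixB (costsB cs)) m lo hi = pvCut cs m := by
  rw [bsearchB]
  split
  case isTrue h =>
    have hmid : (lo + hi) / 2 < cs.length := by omega
    show (if (prefixB (costsB cs)).getD ((lo + hi) / 2) 0 > m then
        bsearchB (prefixB (costsB cs)) m lo ((lo + hi) / 2)
      else bsearchB (prefixB (costsB cs)) m ((lo + hi) / 2 + 1) hi) = pvCut cs m
    split
    case isTrue hgt =>
      rw [prefix_getD cs _ hmid] at hgt
      apply bsearchB_eq cs m lo ((lo + hi) / 2) (by omega) (by omega) hlo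
      intro j hj1 hj2
      calc m < pvS cs ((lo + hi) / 2 + 1) := hgt
        _ ≤ pvS cs (j + 1) := pvS_mono cs _ _ (by omega) (by omega)
    case isFalse hle =>
      rw [prefix_getD cs _ hmid] at hle
      apply bsearchB_eq cs m ((lo + hi) / 2 + 1) hi (by omega) hhi _ hhi2
      intro j hj
      calc pvS cs (j + 1) ≤ pvS cs ((lo + hi) / 2 + 1) := pvS_mono cs _ _ (by omega) (by omega)
        _ ≤ m := by omega
  case isFalse h =>
    have hl : lo = hi := by omega
    subst hl
    exact pvCut_unique cs m lo (by omega) hlo (fun hlt => hhi2 lo le_rfl hlt)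
termination_by hi - lo
decreasing_by all_goals omega

-- ===== VERDICT (by name: the statement is the Claim_ definition above) =====
theorem truncateLabel_spec : Claim_equal_truncateLabel := by
  intro text m _
  unfold Spec_truncateLabel truncateLabel truncateLabel_alt
  have hA : truncGoA text.toList m 0 (pvS text.toList 0)
      = String.mk (text.toList.take (pvCut text.toList m)) :=
    truncGoA_eq text.toList m 0 (Nat.zero_le _) (by intro j hj; omega)
  have hB : bsearchB (prefixB (costsB text.toList)) m 0 (prefixB (costsB text.toList)).length
      = pvCut text.toList m := by
    rw [prefix_length]
    exact bsearchB_eq text.toList m 0 text.toList.length (Nat.zero_le _) le_rfl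
      (by intro j hj; omega) (by intro j hj1 hj2; omega)
  simp only [pvS, List.take_zero, List.sum_nil] at hA
  rw [hA]
  show _ = String.mk (PySem.List.slice text.toList none
    (some ((bsearchB (prefixB (costsB text.toList)) m 0 (prefixB (costsB text.toList)).length : Nat) : Int)))
  rw [hB, PySem.List.slice_to_natCast]
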